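-- pv_equiv track=rewrite | github.com/wolmok/Algorithm | limsumin/프로그래머스/Prg_lv4_가사검색.py | solution
-- ===== SOURCE A (Python) =====
-- from bisect import bisect_left, bisect_right
--
-- def count_by_range(ar, left, right):
--     right_idx = bisect_right(ar, right)
--     left_idx = bisect_left(ar, left)
--     return right_idx - left_idx
--
-- def solution(words, queries):
--     answer = []
--     arr = [[] for _ in range(10001)]
--     reversed_arr = [[] for _ in range(10001)]
--
--     for word in words:
--         arr[len(word)].append(word)
--         reversed_arr[len(word)].append(word[::-1])
--
--     for i in range(10001):
--         arr[i].sort()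
--         reversed_arr[i].sort()
--
--     for q in queries:
--         if q[0] != '?':
--             res = count_by_range(arr[len(q)], q.replace('?', 'a'), q.replace('?', 'z'))
--         else:
--             res = count_by_range(reversed_arr[len(q)], q[::-1].replace('?', 'a'), q[::-1].replace('?', 'z'))
--         answer.append(res)
--
--     return answer
-- ===== SOURCE B (Python) =====
-- def solution(words, queries):
--     # One pass over words per query; no length buckets, no sorting, no bisect.
--     answer = []
--     for q in queries:
--         if q[0] != '?':
--             lo, hi = q.replace('?', 'a'), q.replace('?', 'z')
--             res = sum(1 for w in words if len(w) == len(q) and lo <= w <= hi)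
--         else:
--             r = q[::-1]
--             lo, hi = r.replace('?', 'a'), r.replace('?', 'z')
--             res = sum(1 for w in words if len(w) == len(q) and lo <= w[::-1] <= hi)
--         answer.append(res)
--     return answer
-- ===== Notes on version B (the rewrite author's own statement) =====
-- stated objective: simpler
-- what changed: Replaces the 10001 length buckets + per-bucket sorting + bisect range counting with a direct per-query linear scan that counts words of the query's length lying in the [replace('?','a'), replace('?','z')] interval (reversed for leading-'?' queries).
import Mathlib
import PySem

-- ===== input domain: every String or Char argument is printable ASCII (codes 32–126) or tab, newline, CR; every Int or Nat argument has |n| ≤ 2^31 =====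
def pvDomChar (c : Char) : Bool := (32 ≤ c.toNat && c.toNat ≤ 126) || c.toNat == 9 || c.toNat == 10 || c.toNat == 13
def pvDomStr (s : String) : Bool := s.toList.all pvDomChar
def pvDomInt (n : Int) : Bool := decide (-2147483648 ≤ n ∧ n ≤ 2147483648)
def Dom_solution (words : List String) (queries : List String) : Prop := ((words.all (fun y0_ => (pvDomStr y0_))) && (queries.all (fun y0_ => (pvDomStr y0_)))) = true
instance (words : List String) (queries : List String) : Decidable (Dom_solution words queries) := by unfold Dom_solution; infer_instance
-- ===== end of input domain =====

-- B replaces A's 10001 length buckets + per-bucket sort + bisect with a direct per-query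
-- linear count of the words of the query's length lying in the same string interval (simpler, not faster).

-- ===== PORT A =====
-- len(s) as a Nat (pvLen is this value as an Int: pvLen_eq)
def pvLen (s : String) : Nat := s.toList.length

-- count_by_range: bisect_right/bisect_left are the stdlib calls, ported as PySem.List.bisectLeft/bisectRight
def countByRange (ar : List String) (left right : String) : Int :=
  (PySem.List.bisectRight ar right : Int) - (PySem.List.bisectLeft ar left : Int)

-- the body of A's first loop: append word (resp. word[::-1], cf. PySem.Str.slice?_none_none_neg_one) to the length bucket
def pvFill (p : List (List String) × List (List String)) (word : String) : List (List String) × List (List String) :=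
  (p.1.set (pvLen word) (p.1.getD (pvLen word) [] ++ [word]),
   p.2.set (pvLen word) (p.2.getD (pvLen word) [] ++ [String.ofList word.toList.reverse]))

def solution (words : List String) (queries : List String) : List Int :=
  let arr : List (List String) := List.replicate 10001 []
  let reversedArr : List (List String) := List.replicate 10001 []
  let p := words.foldl pvFill (arr, reversedArr)
  -- for i in range(10001): arr[i].sort(); reversed_arr[i].sort()
  let sortedArr := p.1.map (fun b => PySem.List.sorted b (fun w => w) false)
  let sortedRev := p.2.map (fun b => PySem.List.sorted b (fun w => w) false)
  queries.foldl (fun answer q =>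
    let res : Int :=
      if PySem.Str.pyGet? q 0 ≠ some '?' then
        countByRange (sortedArr.getD (pvLen q) [])
          (PySem.Str.replace q "?" "a") (PySem.Str.replace q "?" "z")
      else
        let r := String.ofList q.toList.reverse   -- q[::-1]
        countByRange (sortedRev.getD (pvLen q) [])
          (PySem.Str.replace r "?" "a") (PySem.Str.replace r "?" "z")
    answer ++ [res]) []

-- ===== PORT B =====
def solution_alt (words : List String) (queries : List String) : List Int :=
  queries.foldl (fun answer q =>
    let res : Int :=
      if PySem.Str.pyGet? q 0 ≠ some '?' then
        let lo := PySem.Str.replace q "?" "a"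
        let hi := PySem.Str.replace q "?" "z"
        ((words.countP (fun w =>
            pvLen w == pvLen q && (decide (lo ≤ w) && decide (w ≤ hi)))) : Int)
      else
        let r := String.ofList q.toList.reverse   -- q[::-1]
        let lo := PySem.Str.replace r "?" "a"
        let hi := PySem.Str.replace r "?" "z"
        ((words.countP (fun w =>
            pvLen w == pvLen q &&
              (decide (lo ≤ String.ofList w.toList.reverse) &&
               decide (String.ofList w.toList.reverse ≤ hi)))) : Int)
    answer ++ [res]) []

-- ===== PRECONDITION & SPEC =====
-- Pre_ excludes exactly the inputs where Python A raises IndexError: an empty query (q[0]),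
-- or a word/query longer than 10000 (the fixed 10001-bucket tables).
def Pre_solution (words : List String) (queries : List String) : Prop :=
  (∀ w ∈ words, pvLen w ≤ 10000) ∧
  (∀ q ∈ queries, 1 ≤ pvLen q ∧ pvLen q ≤ 10000)
instance (words : List String) (queries : List String) : Decidable (Pre_solution words queries) := by
  unfold Pre_solution; infer_instance

def pvWitness_solution : List String × List String :=
  (["frodo", "front", "frost", "frane", "kakao"], ["fro??", "????o", "fr???", "fro???", "pro?"])

def Spec_solution (words : List String) (queries : List String) (out : List Int) : Prop := out = solution_alt words queries
instance (words : List String) (queries : List String) (out : List Int) : Decidable (Spec_solution words queries out) := by unfold Spec_solution; infer_instance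

-- ===== CLAIM (what is proved, stated in full; the proofs are below) =====
def Claim_equal_solution : Prop := ∀ (words : List String) (queries : List String), Dom_solution words queries → Pre_solution words queries → Spec_solution words queries (solution words queries)

-- ===== LEMMAS AND PROOFS =====

-- countP of a prefix-true/suffix-false predicate is the cut point
theorem countP_eq_of_cut {α : Type} (p : α → Bool) :
    ∀ (xs : List α) (k : Nat), k ≤ xs.length →
      (∀ j (hj : j < xs.length), j < k → p xs[j]) →
      (∀ j (hj : j < xs.length), k ≤ j → ¬ p xs[j]) →
      xs.countP p = k := by
  intro xs
  induction xs with
  | nil => intro k hk _ _; simpa using (Nat.le_zero.mp hk).symm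
  | cons a t ih =>
    intro k hk h1 h2
    cases k with
    | zero =>
      have : ∀ x ∈ (a :: t), ¬ p x := by
        intro x hx
        obtain ⟨j, hj, rfl⟩ := List.getElem_of_mem hx
        exact h2 j hj (Nat.zero_le j)
      simpa using List.countP_eq_zero.mpr this
    | succ k' =>
      have hpa : p a := h1 0 (by simp) (Nat.succ_pos k')
      have ht : t.countP p = k' := by
        apply ih k' (by simpa using hk)
        · intro j hj hjk
          have := h1 (j+1) (by simpa using hj) (by omega)
          simpa using this
        · intro j hj hjk
          have := h2 (j+1) (by simpa using hj) (by omega)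
          simpa using this
      simp [hpa, ht]

-- bisect loop specs for String (PySem states them for Int; same fuel induction)

theorem pairwise_le_getElem (xs : List String) (hs : List.Pairwise (fun a b => a ≤ b) xs)
    (i j : Nat) (hij : i ≤ j) (hj : j < xs.length) : xs[i]'(by omega) ≤ xs[j] := by
  rcases Nat.lt_or_ge i j with h | h
  · exact (List.pairwise_iff_getElem.mp hs) i j (by omega) hj h
  · have : i = j := by omega
    subst this; exact le_refl _

theorem bisectRightLoop_spec_str (xs : List String) (x : String)
    (hs : List.Pairwise (fun a b => a ≤ b) xs) :
    ∀ (fuel lo hi : Nat), lo ≤ hi → hi ≤ xs.length → hi - lo ≤ fuel →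
      (∀ j (hj : j < xs.length), j < lo → xs[j] ≤ x) →
      (∀ j (hj : j < xs.length), hi ≤ j → x < xs[j]) →
      lo ≤ PySem.List.bisectRightLoop xs x fuel lo hi ∧
      PySem.List.bisectRightLoop xs x fuel lo hi ≤ hi ∧
      (∀ j (hj : j < xs.length), j < PySem.List.bisectRightLoop xs x fuel lo hi → xs[j] ≤ x) ∧
      (∀ j (hj : j < xs.length), PySem.List.bisectRightLoop xs x fuel lo hi ≤ j → x < xs[j]) := by
  intro fuel
  induction fuel with
  | zero =>
    intro lo hi hlh hhl hf h1 h2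
    rw [PySem.List.bisectRightLoop.eq_1]
    have : lo = hi := by omega
    subst this
    exact ⟨le_refl _, le_refl _, h1, h2⟩
  | succ fuel ih =>
    intro lo hi hlh hhl hf h1 h2
    rw [PySem.List.bisectRightLoop.eq_2]
    by_cases hcond : lo < hi
    · have hmidlt : (lo + hi) / 2 < xs.length := by omega
      have hget : xs[(lo + hi) / 2]? = some (xs[(lo + hi) / 2]'hmidlt) :=
        List.getElem?_eq_getElem hmidlt
      rw [hget]
      simp only []
      by_cases hxy : x < xs[(lo + hi) / 2]'hmidlt
      · simp only [if_pos hcond, if_pos hxy]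
        have h2' : ∀ j (hj : j < xs.length), (lo + hi) / 2 ≤ j → x < xs[j] := by
          intro j hj hjm
          exact lt_of_lt_of_le hxy (pairwise_le_getElem xs hs _ j hjm hj)
        have := ih lo ((lo + hi) / 2) (by omega) (by omega) (by omega) h1 h2'
        exact ⟨this.1, le_trans this.2.1 (by omega), this.2.2.1, this.2.2.2⟩
      · simp only [if_pos hcond, if_neg hxy]
        have hy : xs[(lo + hi) / 2]'hmidlt ≤ x := not_lt.mp hxy
        have h1' : ∀ j (hj : j < xs.length), j < (lo + hi) / 2 + 1 → xs[j] ≤ x := by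
          intro j hj hjm
          exact le_trans (pairwise_le_getElem xs hs j _ (by omega) hmidlt) hy
        have := ih ((lo + hi) / 2 + 1) hi (by omega) hhl (by omega) h1' h2
        exact ⟨le_trans (by omega) this.1, this.2.1, this.2.2.1, this.2.2.2⟩
    · simp only [if_neg hcond]
      have : lo = hi := by omega
      subst this
      exact ⟨le_refl _, le_refl _, h1, h2⟩
theorem bisectLeftLoop_spec_str (xs : List String) (x : String)
    (hs : List.Pairwise (fun a b => a ≤ b) xs) :
    ∀ (fuel lo hi : Nat), lo ≤ hi → hi ≤ xs.length → hi - lo ≤ fuel →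
      (∀ j (hj : j < xs.length), j < lo → xs[j] < x) →
      (∀ j (hj : j < xs.length), hi ≤ j → x ≤ xs[j]) →
      lo ≤ PySem.List.bisectLeftLoop xs x fuel lo hi ∧
      PySem.List.bisectLeftLoop xs x fuel lo hi ≤ hi ∧
      (∀ j (hj : j < xs.length), j < PySem.List.bisectLeftLoop xs x fuel lo hi → xs[j] < x) ∧
      (∀ j (hj : j < xs.length), PySem.List.bisectLeftLoop xs x fuel lo hi ≤ j → x ≤ xs[j]) := by
  intro fuel
  induction fuel with
  | zero =>
    intro lo hi hlh hhl hf h1 h2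
    rw [PySem.List.bisectLeftLoop.eq_1]
    have : lo = hi := by omega
    subst this
    exact ⟨le_refl _, le_refl _, h1, h2⟩
  | succ fuel ih =>
    intro lo hi hlh hhl hf h1 h2
    rw [PySem.List.bisectLeftLoop.eq_2]
    by_cases hcond : lo < hi
    · have hmidlt : (lo + hi) / 2 < xs.length := by omega
      have hget : xs[(lo + hi) / 2]? = some (xs[(lo + hi) / 2]'hmidlt) :=
        List.getElem?_eq_getElem hmidlt
      rw [hget]
      simp only []
      by_cases hxy : xs[(lo + hi) / 2]'hmidlt < x
      · simp only [if_pos hcond, if_pos hxy]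
        have h1' : ∀ j (hj : j < xs.length), j < (lo + hi) / 2 + 1 → xs[j] < x := by
          intro j hj hjm
          exact lt_of_le_of_lt (pairwise_le_getElem xs hs j _ (by omega) hmidlt) hxy
        have := ih ((lo + hi) / 2 + 1) hi (by omega) hhl (by omega) h1' h2
        exact ⟨le_trans (by omega) this.1, this.2.1, this.2.2.1, this.2.2.2⟩
      · simp only [if_pos hcond, if_neg hxy]
        have hy : x ≤ xs[(lo + hi) / 2]'hmidlt := not_lt.mp hxy
        have h2' : ∀ j (hj : j < xs.length), (lo + hi) / 2 ≤ j → x ≤ xs[j] := by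
          intro j hj hjm
          exact le_trans hy (pairwise_le_getElem xs hs _ j hjm hj)
        have := ih lo ((lo + hi) / 2) (by omega) (by omega) (by omega) h1 h2'
        exact ⟨this.1, le_trans this.2.1 (by omega), this.2.2.1, this.2.2.2⟩
    · simp only [if_neg hcond]
      have : lo = hi := by omega
      subst this
      exact ⟨le_refl _, le_refl _, h1, h2⟩
theorem bisectRight_count (xs : List String) (x : String)
    (hs : List.Pairwise (fun a b => a ≤ b) xs) :
    PySem.List.bisectRight xs x = xs.countP (fun w => decide (w ≤ x)) := by
  have h := bisectRightLoop_spec_str xs x hs xs.length 0 xs.length (Nat.zero_le _) (le_refl _)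
    (by omega) (by intro j hj hj0; omega) (by intro j hj hjl; omega)
  refine (countP_eq_of_cut _ xs _ h.2.1 ?_ ?_).symm
  · intro j hj hjk
    simpa using h.2.2.1 j hj hjk
  · intro j hj hjk
    simp only [decide_eq_true_eq]
    exact not_le.mpr (h.2.2.2 j hj hjk)

theorem bisectLeft_count (xs : List String) (x : String)
    (hs : List.Pairwise (fun a b => a ≤ b) xs) :
    PySem.List.bisectLeft xs x = xs.countP (fun w => decide (w < x)) := by
  have h := bisectLeftLoop_spec_str xs x hs xs.length 0 xs.length (Nat.zero_le _) (le_refl _)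
    (by omega) (by intro j hj hj0; omega) (by intro j hj hjl; omega)
  refine (countP_eq_of_cut _ xs _ h.2.1 ?_ ?_).symm
  · intro j hj hjk
    simpa using h.2.2.1 j hj hjk
  · intro j hj hjk
    simp only [decide_eq_true_eq]
    exact not_lt.mpr (h.2.2.2 j hj hjk)
-- split a ≤-count at lo (lo ≤ hi)
theorem countP_le_split (lo hi : String) (hlohi : lo ≤ hi) (xs : List String) :
    xs.countP (fun w => decide (w ≤ hi)) =
      xs.countP (fun w => decide (w < lo)) +
      xs.countP (fun w => decide (lo ≤ w) && decide (w ≤ hi)) := by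
  induction xs with
  | nil => simp
  | cons a t ih =>
    by_cases hlt : a < lo
    · have hahi : a ≤ hi := le_trans (le_of_lt hlt) hlohi
      have hnla : ¬ lo ≤ a := not_le.mpr hlt
      simp only [List.countP_cons, ih]
      simp [hlt, hahi, hnla]
      omega
    · have hla : lo ≤ a := not_lt.mp hlt
      by_cases hle : a ≤ hi
      · simp only [List.countP_cons, ih]
        simp [hlt, hle, hla]
        omega
      · simp only [List.countP_cons, ih]
        simp [hlt, hle]

-- A's range count on the sorted bucket is B's interval count on the raw bucket
theorem countByRange_sorted (bucket : List String) (lo hi : String) (hlohi : lo ≤ hi) :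
    countByRange (PySem.List.sorted bucket (fun w => w) false) lo hi =
      (bucket.countP (fun w => decide (lo ≤ w) && decide (w ≤ hi)) : Int) := by
  have hs : List.Pairwise (fun a b => a ≤ b) (PySem.List.sorted bucket (fun w => w) false) :=
    PySem.List.sorted_pairwise bucket (fun w => w)
  have hperm := PySem.List.sorted_perm bucket (fun w => w) false
  unfold countByRange
  rw [bisectRight_count _ _ hs, bisectLeft_count _ _ hs,
    countP_le_split lo hi hlohi (PySem.List.sorted bucket (fun w => w) false),
    hperm.countP_eq (fun w => decide (w < lo)),
    hperm.countP_eq (fun w => decide (lo ≤ w) && decide (w ≤ hi))]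
  push_cast
  ring

-- single-character replace is a map
theorem go_single (c : Char) :
    ∀ (fuel : Nat) (l acc : List Char), l.length ≤ fuel →
      PySem.Chars.replace.go ['?'] [c] fuel l acc =
        acc.reverse ++ l.map (fun d => if d = '?' then c else d) := by
  intro fuel
  induction fuel with
  | zero =>
    intro l acc h
    have : l = [] := List.eq_nil_of_length_eq_zero (by omega)
    subst this
    simp [PySem.Chars.replace.go]
  | succ fuel ih =>
    intro l acc h
    cases l with
    | nil => simp [PySem.Chars.replace.go]
    | cons d t =>
      by_cases hd : d = '?'
      · subst hd
        have hpre : List.isPrefixOf ['?'] ('?' :: t) = true := by simp [List.isPrefixOf]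
        simp only [PySem.Chars.replace.go, hpre, if_pos]
        rw [ih _ _ (by simpa using h)]
        simp
      · have hpre : List.isPrefixOf ['?'] (d :: t) = false := by
          simp [List.isPrefixOf]; exact fun h' => hd h'.symm
        simp only [PySem.Chars.replace.go, hpre]
        rw [if_neg (by simp)]
        rw [ih _ _ (by simpa using h)]
        simp [hd]

theorem chars_replace_single (c : Char) (cs : List Char) :
    PySem.Chars.replace cs ['?'] [c] = cs.map (fun d => if d = '?' then c else d) := by
  unfold PySem.Chars.replace
  simp only [List.isEmpty_cons]
  rw [go_single c cs.length cs [] (le_refl _)]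
  simp

theorem str_replace_single (c : Char) (s : String) :
    (PySem.Str.replace s (String.ofList ['?']) (String.ofList [c])).toList =
      s.toList.map (fun d => if d = '?' then c else d) := by
  rw [PySem.Str.toList_replace]
  have h1 : (String.ofList ['?']).toList = ['?'] := by decide
  have h2 : (String.ofList [c]).toList = [c] := String.toList_ofList
  rw [h1, h2]
  exact chars_replace_single c s.toList

-- the two replaced bounds are ordered
theorem map_az_le (cs : List Char) :
    cs.map (fun d => if d = '?' then 'a' else d) ≤ cs.map (fun d => if d = '?' then 'z' else d) := by
  induction cs with
  | nil => simp
  | cons d t ih =>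
    by_cases hd : d = '?'
    · subst hd
      simp only [List.map_cons]
      exact le_of_lt (List.cons_lt_cons_iff.mpr (Or.inl (by decide)))
    · simp only [List.map_cons, if_neg hd]
      exact List.cons_le_cons d ih

theorem replace_lo_le_hi (s : String) :
    PySem.Str.replace s "?" "a" ≤ PySem.Str.replace s "?" "z" := by
  rw [String.le_iff_toList_le]
  have hq : ("?" : String) = String.ofList ['?'] := by decide
  have ha : ("a" : String) = String.ofList ['a'] := by decide
  have hz : ("z" : String) = String.ofList ['z'] := by decide
  rw [hq, ha, hz, str_replace_single, str_replace_single]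
  exact map_az_le s.toList

-- bucket-fold invariant
theorem getD_set_self (l : List (List String)) (n : Nat) (v : List String) (h : n < l.length) :
    (l.set n v).getD n [] = v := by
  simp [List.getD_eq_getElem?_getD, h]

theorem getD_set_ne (l : List (List String)) (n i : Nat) (v : List String) (h : n ≠ i) :
    (l.set n v).getD i [] = l.getD i [] := by
  simp [List.getD_eq_getElem?_getD, List.getElem?_set_ne, h]

theorem fill_inv (ws : List String) :
    ∀ (a r : List (List String)), a.length = 10001 → r.length = 10001 →
      (∀ w ∈ ws, pvLen w ≤ 10000) →
      ((ws.foldl pvFill (a, r)).1.length = 10001 ∧ (ws.foldl pvFill (a, r)).2.length = 10001) ∧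
      ∀ i : Nat, i ≤ 10000 →
        (ws.foldl pvFill (a, r)).1.getD i [] =
          a.getD i [] ++ ws.filter (fun w => pvLen w == i) ∧
        (ws.foldl pvFill (a, r)).2.getD i [] =
          r.getD i [] ++ (ws.filter (fun w => pvLen w == i)).map
            (fun w => String.ofList w.toList.reverse) := by
  induction ws with
  | nil => intro a r ha hr _; simp [ha, hr]
  | cons w ws ih =>
    intro a r ha hr hw
    have hn : pvLen w ≤ 10000 := hw w (by simp)
    have hna : pvLen w < a.length := by omega
    have hnr : pvLen w < r.length := by omega
    have hstep : (w :: ws).foldl pvFill (a, r) = ws.foldl pvFill (pvFill (a, r) w) := by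
      simp [List.foldl_cons]
    have ha' : (pvFill (a, r) w).1.length = 10001 := by simp [pvFill, ha]
    have hr' : (pvFill (a, r) w).2.length = 10001 := by simp [pvFill, hr]
    have ihh := ih (pvFill (a, r) w).1 (pvFill (a, r) w).2 ha' hr'
      (fun x hx => hw x (by simp [hx]))
    rw [hstep]
    refine ⟨ihh.1, ?_⟩
    intro i hi
    have h2 := ihh.2 i hi
    by_cases hin : pvLen w = i
    · have hfa : (pvFill (a, r) w).1.getD i [] = a.getD i [] ++ [w] := by
        simp only [pvFill]
        rw [← hin]
        exact getD_set_self a (pvLen w) _ hna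
      have hfr : (pvFill (a, r) w).2.getD i [] =
          r.getD i [] ++ [String.ofList w.toList.reverse] := by
        simp only [pvFill]
        rw [← hin]
        exact getD_set_self r (pvLen w) _ hnr
      constructor
      · rw [h2.1, hfa, List.filter_cons]
        simp [hin]
      · rw [h2.2, hfr, List.filter_cons]
        simp [hin]
    · have hfa : (pvFill (a, r) w).1.getD i [] = a.getD i [] := by
        simp only [pvFill]
        exact getD_set_ne a (pvLen w) i _ hin
      have hfr : (pvFill (a, r) w).2.getD i [] = r.getD i [] := by
        simp only [pvFill]
        exact getD_set_ne r (pvLen w) i _ hin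
      constructor
      · rw [h2.1, hfa, List.filter_cons]
        simp [hin]
      · rw [h2.2, hfr, List.filter_cons]
        simp [hin]

-- ===== VERDICT (by name: the statement is the Claim_ definition above) =====
-- per-query equality of the two branch results
theorem query_eq (words : List String) (hw : ∀ w ∈ words, pvLen w ≤ 10000)
    (q : String) (hq1 : 1 ≤ pvLen q) (hq2 : pvLen q ≤ 10000) :
    (if PySem.Str.pyGet? q 0 ≠ some '?' then
        countByRange
          (((words.foldl pvFill (List.replicate 10001 [], List.replicate 10001 [])).1.map
              (fun b => PySem.List.sorted b (fun w => w) false)).getD (pvLen q) [])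
          (PySem.Str.replace q "?" "a") (PySem.Str.replace q "?" "z")
      else
        countByRange
          (((words.foldl pvFill (List.replicate 10001 [], List.replicate 10001 [])).2.map
              (fun b => PySem.List.sorted b (fun w => w) false)).getD (pvLen q) [])
          (PySem.Str.replace (String.ofList q.toList.reverse) "?" "a")
          (PySem.Str.replace (String.ofList q.toList.reverse) "?" "z")) =
    (if PySem.Str.pyGet? q 0 ≠ some '?' then
        ((words.countP (fun w =>
            pvLen w == pvLen q &&
              (decide (PySem.Str.replace q "?" "a" ≤ w) &&
               decide (w ≤ PySem.Str.replace q "?" "z")))) : Int)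
      else
        ((words.countP (fun w =>
            pvLen w == pvLen q &&
              (decide (PySem.Str.replace (String.ofList q.toList.reverse) "?" "a" ≤
                  String.ofList w.toList.reverse) &&
               decide (String.ofList w.toList.reverse ≤
                  PySem.Str.replace (String.ofList q.toList.reverse) "?" "z")))) : Int)) := by
  have hfi := fill_inv words (List.replicate 10001 []) (List.replicate 10001 [])
    (by rw [List.length_replicate]) (by rw [List.length_replicate]) hw
  have hbuck := hfi.2 (pvLen q) hq2
  have hrep : (List.replicate 10001 ([] : List String)).getD (pvLen q) [] = [] := by
    rw [List.getD_eq_getElem?_getD, List.getElem?_replicate]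
    split <;> rfl
  have hlt1 : pvLen q < (words.foldl pvFill (List.replicate 10001 [], List.replicate 10001 [])).1.length := by
    rw [hfi.1.1]; omega
  have hlt2 : pvLen q < (words.foldl pvFill (List.replicate 10001 [], List.replicate 10001 [])).2.length := by
    rw [hfi.1.2]; omega
  have hmap1 : ((words.foldl pvFill (List.replicate 10001 [], List.replicate 10001 [])).1.map
      (fun b => PySem.List.sorted b (fun w => w) false)).getD (pvLen q) [] =
      PySem.List.sorted (words.filter (fun w => pvLen w == pvLen q)) (fun w => w) false := by
    rw [List.getD_eq_getElem?_getD, List.getElem?_map, List.getElem?_eq_getElem hlt1]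
    simp only [Option.map_some, Option.getD_some]
    rw [← List.getD_eq_getElem _ [] hlt1]
    rw [hbuck.1, hrep, List.nil_append]
  have hmap2 : ((words.foldl pvFill (List.replicate 10001 [], List.replicate 10001 [])).2.map
      (fun b => PySem.List.sorted b (fun w => w) false)).getD (pvLen q) [] =
      PySem.List.sorted ((words.filter (fun w => pvLen w == pvLen q)).map
        (fun w => String.ofList w.toList.reverse)) (fun w => w) false := by
    rw [List.getD_eq_getElem?_getD, List.getElem?_map, List.getElem?_eq_getElem hlt2]
    simp only [Option.map_some, Option.getD_some]
    rw [← List.getD_eq_getElem _ [] hlt2]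
    rw [hbuck.2, hrep, List.nil_append]
  by_cases hc : PySem.Str.pyGet? q 0 ≠ some '?'
  · rw [if_pos hc, if_pos hc, hmap1]
    rw [countByRange_sorted _ _ _ (replace_lo_le_hi q)]
    rw [List.countP_filter]
    congr 1
    apply List.countP_congr
    intro w _
    rw [Bool.and_comm]
  · rw [if_neg hc, if_neg hc, hmap2]
    rw [countByRange_sorted _ _ _ (replace_lo_le_hi (String.ofList q.toList.reverse))]
    rw [List.countP_map, Function.comp_def, List.countP_filter]
    congr 1
    apply List.countP_congr
    intro w _
    rw [Bool.and_comm]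

theorem solution_spec : Claim_equal_solution := by
  intro words queries hdom hpre
  obtain ⟨hw, hq⟩ := hpre
  unfold Spec_solution solution solution_alt
  simp only [PySem.List.foldl_append_singleton_eq_map, List.nil_append]
  apply List.map_congr_left
  intro q hmem
  exact query_eq words hw q (hq q hmem).1 (hq q hmem).2
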